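-- pv_equiv track=rewrite | github.com/charlesfphillips/GSMG | Mini_Puzzle/decrypt/03_decode_hex.py | decode_hex_section
-- ===== SOURCE A (Python) =====
-- def decode_hex_section(text):
--     """Decode: a=1, b=2, ..., z=26, o=0 -> convert to hex -> ASCII"""
--     char_map = {}
--     for i in range(26):
--         char_map[chr(ord('a') + i)] = str(i + 1)
--     char_map['o'] = '0'
--
--     # Convert each letter to its number
--     num_str = ''.join(char_map.get(c, '') for c in text.lower() if c in char_map)
--
--     # Interpret pairs as hex
--     result = ""
--     for i in range(0, len(num_str) - 1, 2):
--         pair = num_str[i:i+2]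
--         try:
--             val = int(pair, 16)
--             if 32 <= val <= 126:  # Printable ASCII
--                 result += chr(val)
--         except:
--             pass
--     return result, num_str
-- ===== SOURCE B (Python) =====
-- def decode_hex_section(text):
--     """One streaming pass: map each letter to its digit string and decode hex
--     pairs on the fly with a 0-2 digit carry buffer (no second scan of num_str)."""
--     digit_of = {chr(97 + i): str(i + 1) for i in range(26)}
--     digit_of['o'] = '0'
--     result = []
--     parts = []
--     buf = ''
--     for c in text.lower():
--         d = digit_of.get(c)
--         if d is None:
--             continue
--         parts.append(d)
--         buf += d
--         while len(buf) >= 2: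
--             # buf holds decimal digit characters only; read the pair as hex
--             val = 16 * (ord(buf[0]) - 48) + (ord(buf[1]) - 48)
--             if 32 <= val <= 126:
--                 result.append(chr(val))
--             buf = buf[2:]
--     return ''.join(result), ''.join(parts)
-- ===== Notes on version B (the rewrite author's own statement) =====
-- stated objective: alternative
-- what changed: B fuses A's two phases (materialize the whole digit string, then re-scan it by even index pairs) into one streaming pass over text.lower() that decodes hex pairs on the fly from a 0-2 digit carry buffer, never re-scanning num_str.
import Mathlib
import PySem

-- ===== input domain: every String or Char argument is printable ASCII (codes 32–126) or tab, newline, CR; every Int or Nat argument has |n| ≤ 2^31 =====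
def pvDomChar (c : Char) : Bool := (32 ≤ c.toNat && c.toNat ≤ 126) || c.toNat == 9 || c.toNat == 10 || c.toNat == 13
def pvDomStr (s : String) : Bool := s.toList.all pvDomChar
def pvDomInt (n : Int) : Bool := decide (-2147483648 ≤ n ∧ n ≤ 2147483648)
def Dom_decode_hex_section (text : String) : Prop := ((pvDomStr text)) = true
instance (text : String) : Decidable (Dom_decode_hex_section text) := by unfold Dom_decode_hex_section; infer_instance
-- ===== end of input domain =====

-- B fuses A's build-num_str-then-rescan into one streaming pass with a 0–2 digit carry buffer (alternative decomposition, same cost).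

-- ===== PORT A =====
-- char_map built by the range(26) loop, then char_map['o'] = '0'
def pvCharMapA : PySem.Dict Char String :=
  ((PySem.List.pyRange 0 26 1).foldl
    (fun d i => d.insert (Char.ofNat ('a'.toNat + i.toNat)) (PySem.Int.toStr (i + 1)))
    PySem.Dict.empty).insert 'o' "0"

-- num_str = ''.join(char_map.get(c, '') for c in text.lower() if c in char_map)
def pvNumStrA (text : String) : String :=
  PySem.Str.join "" (((PySem.Str.lower text).toList.filter
      (fun c => pvCharMapA.contains c)).map (fun c => pvCharMapA.getD c ""))

def decode_hex_section (text : String) : String × String :=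
  -- for i in range(0, len(num_str) - 1, 2): pair = num_str[i:i+2]; int(pair, 16); chr(val)
  -- (the result string is accumulated as a List Char; chr(val) = Char.ofNat val.toNat, exact for 32 ≤ val ≤ 126)
  (String.ofList
    ((PySem.List.pyRange 0 (PySem.Str.len (pvNumStrA text) - 1) 2).foldl
      (fun result i =>
        match PySem.Int.ofCharsBase? (PySem.List.slice (pvNumStrA text).toList (some i) (some (i + 2))) 16 with
        | some val => if 32 ≤ val ∧ val ≤ 126 then result ++ [Char.ofNat val.toNat] else result
        | none => result)  -- except: pass
      []),
   pvNumStrA text)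

-- ===== PORT B =====
-- digit_of = {chr(97 + i): str(i + 1) for i in range(26)}; digit_of['o'] = '0'
def pvDigitMapB : PySem.Dict Char String :=
  (PySem.Dict.ofList ((PySem.List.pyRange 0 26 1).map
      (fun i => (Char.ofNat (97 + i.toNat), PySem.Int.toStr (i + 1))))).insert 'o' "0"

-- while len(buf) >= 2: val = 16*(ord(buf[0])-48) + (ord(buf[1])-48); maybe append chr(val); buf = buf[2:]
def pvDrainB : List Char → List Char → List Char × List Char
  | res, a :: b :: rest =>
      let val : Int := 16 * ((a.toNat : Int) - 48) + ((b.toNat : Int) - 48)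
      pvDrainB (if 32 ≤ val ∧ val ≤ 126 then res ++ [Char.ofNat val.toNat] else res) rest
  | res, buf => (res, buf)

-- loop body: d = digit_of.get(c); skip if None; extend parts and buf; drain pairs
def pvStepB (st : List Char × List Char × List Char) (c : Char) :
    List Char × List Char × List Char :=
  match pvDigitMapB.get? c with
  | none => st
  | some d =>
      let p := pvDrainB st.1 (st.2.2 ++ d.toList)
      (p.1, st.2.1 ++ d.toList, p.2)

-- the streaming loop over text.lower(): state (result, parts, buf)
def pvRunB (text : String) : List Char × List Char × List Char :=
  (PySem.Str.lower text).toList.foldl pvStepB ([], [], [])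

def decode_hex_section_alt (text : String) : String × String :=
  (String.ofList (pvRunB text).1, String.ofList (pvRunB text).2.1)

-- ===== PRECONDITION & SPEC =====
def Spec_decode_hex_section (text : String) (out : String × String) : Prop := out = decode_hex_section_alt text
instance (text : String) (out : String × String) : Decidable (Spec_decode_hex_section text out) := by unfold Spec_decode_hex_section; infer_instance

-- ===== CLAIM (what is proved, stated in full; the proofs are below) =====
def Claim_equal_decode_hex_section : Prop := ∀ (text : String), Dom_decode_hex_section text → Spec_decode_hex_section text (decode_hex_section text)

-- ===== LEMMAS AND PROOFS =====

def pvDigs : List Char := ['0','1','2','3','4','5','6','7','8','9']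

-- the digit stream both programs generate from the input characters
def pvDigits (cs : List Char) : List Char :=
  cs.flatMap (fun c => match pvDigitMapB.get? c with | none => [] | some d => d.toList)

-- A's pair step, abstracted over the two-character slice
def pvStep (res pair : List Char) : List Char :=
  match PySem.Int.ofCharsBase? pair 16 with
  | some val => if 32 ≤ val ∧ val ≤ 126 then res ++ [Char.ofNat val.toNat] else res
  | none => res

theorem pvMaps_eq : pvDigitMapB = pvCharMapA := by decide

theorem pvCharMapA_lit : pvCharMapA = PySem.Dict.mk
    [('a',"1"),('b',"2"),('c',"3"),('d',"4"),('e',"5"),('f',"6"),('g',"7"),('h',"8"),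
     ('i',"9"),('j',"10"),('k',"11"),('l',"12"),('m',"13"),('n',"14"),('o',"0"),
     ('p',"16"),('q',"17"),('r',"18"),('s',"19"),('t',"20"),('u',"21"),('v',"22"),
     ('w',"23"),('x',"24"),('y',"25"),('z',"26")] := by decide

theorem pvHallB : (([('a',"1"),('b',"2"),('c',"3"),('d',"4"),('e',"5"),('f',"6"),('g',"7"),('h',"8"),
     ('i',"9"),('j',"10"),('k',"11"),('l',"12"),('m',"13"),('n',"14"),('o',"0"),
     ('p',"16"),('q',"17"),('r',"18"),('s',"19"),('t',"20"),('u',"21"),('v',"22"),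
     ('w',"23"),('x',"24"),('y',"25"),('z',"26")] : List (Char × String)).all
       (fun q => q.2.toList.all (fun ch => pvDigs.contains ch))) = true := by decide

theorem pvGetD_digits (c : Char) :
    ∀ ch ∈ (pvCharMapA.getD c "").toList, ch ∈ pvDigs := by
  rw [PySem.Dict.getD_eq_get?_getD]
  cases hc : pvCharMapA.get? c with
  | none => simp
  | some d =>
      rw [pvCharMapA_lit] at hc
      simp only [PySem.Dict.get?] at hc
      obtain ⟨p, hfind, hp⟩ := Option.map_eq_some_iff.mp hc
      have hmem := List.mem_of_find?_eq_some hfind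
      intro ch hch
      have h1 := List.all_eq_true.mp pvHallB p hmem
      have h2 := List.all_eq_true.mp h1 ch (by rw [hp]; exact hch)
      exact List.contains_iff_mem.mp h2

theorem pvPairval (a b : Char) (ha : a ∈ pvDigs) (hb : b ∈ pvDigs) :
    PySem.Int.ofCharsBase? [a, b] 16
      = some (16 * ((a.toNat : Int) - 48) + ((b.toNat : Int) - 48)) := by
  fin_cases ha <;> fin_cases hb <;> decide

theorem pvDrain_append : ∀ (res u v : List Char),
    pvDrainB res (u ++ v) = pvDrainB (pvDrainB res u).1 ((pvDrainB res u).2 ++ v)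
  | _, [], _ => by simp [pvDrainB]
  | _, [a], _ => by simp [pvDrainB]
  | res, a :: b :: u, v => by
      simp only [List.cons_append, pvDrainB]
      exact pvDrain_append _ u v

theorem pvDrain_snd_len : ∀ (res l : List Char), (pvDrainB res l).2.length ≤ 1
  | _, [] => by simp [pvDrainB]
  | _, [a] => by simp [pvDrainB]
  | res, a :: b :: l => by
      simp only [pvDrainB]
      exact pvDrain_snd_len _ l

theorem pvDrain_short (res buf : List Char) (h : buf.length ≤ 1) :
    pvDrainB res buf = (res, buf) := by
  match buf with
  | [] => simp [pvDrainB]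
  | [a] => simp [pvDrainB]
  | a :: b :: t => simp at h

theorem pvBfold : ∀ (cs : List Char) (res parts buf : List Char), buf.length ≤ 1 →
    cs.foldl pvStepB (res, parts, buf) =
      ((pvDrainB res (buf ++ pvDigits cs)).1, parts ++ pvDigits cs,
       (pvDrainB res (buf ++ pvDigits cs)).2) := by
  intro cs
  induction cs with
  | nil =>
      intro res parts buf h
      simp [pvDigits, pvDrain_short res buf h]
  | cons c cs ih =>
      intro res parts buf h
      have hdig : pvDigits (c :: cs)
          = (match pvDigitMapB.get? c with | none => [] | some d => d.toList) ++ pvDigits cs := by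
        simp [pvDigits]
      cases hc : pvDigitMapB.get? c with
      | none =>
          rw [List.foldl_cons]
          have hstep : pvStepB (res, parts, buf) c = (res, parts, buf) := by
            simp [pvStepB, hc]
          rw [hstep, ih res parts buf h, hdig, hc]
          simp
      | some d =>
          rw [List.foldl_cons]
          have hstep : pvStepB (res, parts, buf) c =
              ((pvDrainB res (buf ++ d.toList)).1, parts ++ d.toList,
               (pvDrainB res (buf ++ d.toList)).2) := by
            simp [pvStepB, hc]
          rw [hstep, ih _ _ _ (pvDrain_snd_len res (buf ++ d.toList)), hdig, hc]
          rw [← pvDrain_append res (buf ++ d.toList) (pvDigits cs)]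
          simp [List.append_assoc]

theorem pvChunkfold : ∀ (L acc : List Char), (∀ ch ∈ L, ch ∈ pvDigs) →
    (List.range (L.length / 2)).foldl (fun res k => pvStep res ((L.drop (2 * k)).take 2)) acc
      = (pvDrainB acc L).1
  | [], acc, _ => by simp [pvDrainB]
  | [a], acc, _ => by simp [pvDrainB]
  | a :: b :: t, acc, h => by
      have ha : a ∈ pvDigs := h a (by simp)
      have hb : b ∈ pvDigs := h b (by simp)
      have hlen : (a :: b :: t).length / 2 = t.length / 2 + 1 := by
        simp [List.length_cons]; omega
      rw [hlen, List.range_succ_eq_map, List.foldl_cons, List.foldl_map]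
      have hfun : (fun (res : List Char) (k : Nat) =>
            pvStep res (((a :: b :: t).drop (2 * Nat.succ k)).take 2))
          = fun res k => pvStep res ((t.drop (2 * k)).take 2) := by
        funext res k
        have h2 : 2 * Nat.succ k = (2 * k) + 1 + 1 := by omega
        rw [h2, List.drop_succ_cons, List.drop_succ_cons]
      have hfst : pvStep acc (((a :: b :: t).drop (2 * 0)).take 2) = pvStep acc [a, b] := by
        norm_num
      have hdr : pvDrainB acc (a :: b :: t) = pvDrainB (pvStep acc [a, b]) t := by
        simp only [pvDrainB, pvStep, pvPairval a b ha hb]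
      rw [hfun, hfst, hdr]
      exact pvChunkfold t (pvStep acc [a, b]) (fun ch hch => h ch (by simp [hch]))

theorem pvJoin_nil_flatten : ∀ (l : List (List Char)), PySem.Chars.join [] l = l.flatten
  | [] => PySem.Chars.join_nil []
  | [x] => by simp [PySem.Chars.join_singleton]
  | x :: y :: t => by
      rw [PySem.Chars.join_cons_cons, pvJoin_nil_flatten (y :: t)]
      simp

theorem pvNum_eq (cs : List Char) :
    (((cs.filter (fun c => pvCharMapA.contains c)).map
        (fun c => pvCharMapA.getD c "")).map String.toList).flatten = pvDigits cs := by
  induction cs with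
  | nil => simp [pvDigits]
  | cons c cs ih =>
      have hdig : pvDigits (c :: cs)
          = (match pvDigitMapB.get? c with | none => [] | some d => d.toList) ++ pvDigits cs := by
        simp [pvDigits]
      cases hc : pvCharMapA.get? c with
      | none =>
          have hcon : pvCharMapA.contains c = false := by
            rw [PySem.Dict.contains_eq_isSome_get?, hc]; rfl
          rw [hdig, pvMaps_eq, hc]
          rw [List.map_map] at ih
          simp [hcon, ih]
      | some d =>
          have hcon : pvCharMapA.contains c = true := by
            rw [PySem.Dict.contains_eq_isSome_get?, hc]; rfl
          have hgd : pvCharMapA.getD c "" = d := by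
            rw [PySem.Dict.getD_eq_get?_getD, hc]; rfl
          rw [hdig, pvMaps_eq, hc]
          rw [List.map_map] at ih
          simp [hcon, hgd, ih]

theorem pvDigits_digits (cs : List Char) : ∀ ch ∈ pvDigits cs, ch ∈ pvDigs := by
  intro ch hch
  rw [pvDigits, List.mem_flatMap] at hch
  obtain ⟨c, _, hm⟩ := hch
  cases hc : pvDigitMapB.get? c with
  | none => rw [hc] at hm; simp at hm
  | some d =>
      rw [hc] at hm
      have hgd : (pvCharMapA.getD c "").toList = d.toList := by
        rw [PySem.Dict.getD_eq_get?_getD, ← pvMaps_eq, hc]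
        rfl
      exact pvGetD_digits c ch (by rw [hgd]; exact hm)

theorem pvAloop (L : List Char) (hL : ∀ ch ∈ L, ch ∈ pvDigs) :
    (PySem.List.pyRange 0 ((L.length : Int) - 1) 2).foldl
      (fun result i =>
        match PySem.Int.ofCharsBase? (PySem.List.slice L (some i) (some (i + 2))) 16 with
        | some val => if 32 ≤ val ∧ val ≤ 126 then result ++ [Char.ofNat val.toNat] else result
        | none => result) []
      = (pvDrainB [] L).1 := by
  rw [PySem.List.pyRange_of_pos 0 ((L.length : Int) - 1) (by norm_num)]
  have hM : (if (0:Int) < (L.length : Int) - 1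
      then (((L.length : Int) - 1 - 0 + 2 - 1) / 2).toNat else 0) = L.length / 2 := by
    split_ifs with h <;> omega
  rw [hM, List.foldl_map]
  have hfun : (fun (result : List Char) (k : Nat) =>
        match PySem.Int.ofCharsBase?
            (PySem.List.slice L (some ((0:Int) + 2 * (k:Int))) (some ((0:Int) + 2 * (k:Int) + 2))) 16 with
        | some val => if 32 ≤ val ∧ val ≤ 126 then result ++ [Char.ofNat val.toNat] else result
        | none => result)
      = fun res k => pvStep res ((L.drop (2 * k)).take 2) := by
    funext res k
    have hs : PySem.List.slice L (some ((0:Int) + 2 * (k:Int))) (some ((0:Int) + 2 * (k:Int) + 2))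
        = (L.drop (2 * k)).take 2 := by
      have h1 : (0:Int) + 2 * (k:Int) = ((2 * k : Nat) : Int) := by push_cast; ring
      have h2 : (0:Int) + 2 * (k:Int) + 2 = ((2 * k : Nat) : Int) + ((2 : Nat) : Int) := by
        push_cast; ring
      rw [h2, h1, PySem.List.slice_natCast_add]
    rw [hs]; rfl
  rw [hfun]
  exact pvChunkfold L [] hL

-- ===== VERDICT (by name: the statement is the Claim_ definition above) =====
theorem decode_hex_section_spec : Claim_equal_decode_hex_section := by
  intro text _
  show decode_hex_section text = decode_hex_section_alt text
  have hnum : (pvNumStrA text).toList = pvDigits (PySem.Str.lower text).toList := by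
    rw [pvNumStrA, PySem.Str.toList_join]
    have h0 : ("" : String).toList = [] := rfl
    rw [h0, pvJoin_nil_flatten]
    exact pvNum_eq _
  have hstr : pvNumStrA text = String.ofList (pvDigits (PySem.Str.lower text).toList) := by
    rw [← hnum, String.ofList_toList]
  have hrun : pvRunB text =
      ((pvDrainB [] (pvDigits (PySem.Str.lower text).toList)).1,
       pvDigits (PySem.Str.lower text).toList,
       (pvDrainB [] (pvDigits (PySem.Str.lower text).toList)).2) := by
    rw [pvRunB, pvBfold _ [] [] [] (by simp)]
    simp
  rw [decode_hex_section, decode_hex_section_alt, hrun, PySem.Str.len_eq, hnum, hstr]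
  exact congrArg (fun r => (String.ofList r, String.ofList (pvDigits (PySem.Str.lower text).toList)))
    (pvAloop _ (pvDigits_digits _))
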